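-- pv_equiv track=rewrite | github.com/neulab/compare-mt | count_ngrams.py | iterate_sent_ngrams
-- ===== SOURCE A (Python) =====
-- def iterate_sent_ngrams(words, labels=None, min_length=1, max_length=4):
--   """
--   Create a list with all the n-grams in a sentence
--
--   Arguments:
--     words: A list of strings representing a sentence
--     labels: A list of labels on each word in the sentence, optional (will use `words` if not specified)
--     max_length: The minimum ngram length to consider
--     max_length: The maximum ngram length to consider
--
--   Returns:
--     An iterator over n-grams in the sentence with both words and labels
--   """
--   if labels is not None and len(labels) != len(words):
--     raise ValueError('length of labels and sentence must be the same')
--   for n in range(min_length-1, max_length):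
--     for i in range(len(words) - n):
--       word_ngram = tuple(words[i:i + n + 1])
--       label_ngram = tuple(labels[i:i + n + 1]) if (labels is not None) else word_ngram
--       yield word_ngram, label_ngram
-- ===== SOURCE B (Python) =====
-- def iterate_sent_ngrams(words, labels=None, min_length=1, max_length=4):
--   if labels is not None and len(labels) != len(words):
--     raise ValueError('length of labels and sentence must be the same')
--   for length in range(min_length, min(max_length, len(words)) + 1):
--     word_ngrams = zip(*(words[j:] for j in range(length)))
--     if labels is None:
--       for w in word_ngrams:
--         yield w, w
--     else:
--       label_ngrams = zip(*(labels[j:] for j in range(length)))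
--       yield from zip(word_ngrams, label_ngrams)
-- ===== Notes on version B (the rewrite author's own statement) =====
-- stated objective: alternative
-- what changed: B groups the output by n-gram length and builds each length's whole window list with one zip over shifted suffixes (zip(*(words[j:] for j in range(L)))), instead of A's per-start-index slicing in a nested index loop; the labels row is zipped against the word row rather than sliced per index.
-- intended difference: On inputs with min_length <= 0 (and min_length <= max_length) A also yields the windows for the non-positive lengths min_length-1 <= n < 0 - empty or negatively-truncated slices words[i:i+n+1], an artefact of feeding n < 0 into the window loop - while B yields only the n-grams of positive lengths, the intended set of n-grams. — e.g. on iterate_sent_ngrams(["a"], none, 0, 1): A returns [([], []), ([], []), (["a"], ["a"])], B returns [(["a"], ["a"])]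
import Mathlib
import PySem

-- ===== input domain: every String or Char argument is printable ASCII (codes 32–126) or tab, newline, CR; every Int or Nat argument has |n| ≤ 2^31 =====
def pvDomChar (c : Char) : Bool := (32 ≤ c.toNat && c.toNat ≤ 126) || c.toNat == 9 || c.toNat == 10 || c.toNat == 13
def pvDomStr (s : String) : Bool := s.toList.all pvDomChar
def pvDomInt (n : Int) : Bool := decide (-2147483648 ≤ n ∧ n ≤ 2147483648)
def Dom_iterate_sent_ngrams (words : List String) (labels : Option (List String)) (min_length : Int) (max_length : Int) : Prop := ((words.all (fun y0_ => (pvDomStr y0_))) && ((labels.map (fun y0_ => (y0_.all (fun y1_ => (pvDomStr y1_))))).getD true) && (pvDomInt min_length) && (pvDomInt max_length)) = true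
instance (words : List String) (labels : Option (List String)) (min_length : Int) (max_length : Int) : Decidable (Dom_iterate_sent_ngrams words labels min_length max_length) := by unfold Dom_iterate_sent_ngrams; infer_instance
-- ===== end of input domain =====

-- B re-groups the n-grams by length and builds each length's window list with one zip of
-- shifted suffixes instead of slicing a fresh window per start index (objective: alternative
-- decomposition; equivalence about the RETURN sequence of the generators, fully materialised).

-- ===== PORT A =====
def iterate_sent_ngrams (words : List String) (labels : Option (List String)) (min_length : Int) (max_length : Int) : List (List String × List String) :=
  (PySem.List.pyRange (min_length - 1) max_length).foldl (fun acc n =>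
    (PySem.List.pyRange 0 ((words.length : Int) - n)).foldl (fun acc2 i =>
      let word_ngram := PySem.List.slice words (some i) (some (i + n + 1))
      let label_ngram := match labels with
        | some l => PySem.List.slice l (some i) (some (i + n + 1))
        | none => word_ngram
      acc2 ++ [(word_ngram, label_ngram)]) acc) []

-- ===== PORT B =====
-- zip(*iterables) for a list of lists: truncates to the shortest, zip() of no iterables is empty
def pyZipN {α : Type} : List (List α) → List (List α)
  | [] => []
  | [xs] => xs.map (fun x => [x])
  | xs :: ys :: rest => (xs.zip (pyZipN (ys :: rest))).map (fun p => p.1 :: p.2)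

def iterate_sent_ngrams_alt (words : List String) (labels : Option (List String)) (min_length : Int) (max_length : Int) : List (List String × List String) :=
  (PySem.List.pyRange min_length (min max_length (words.length : Int) + 1)).foldl (fun acc L =>
    let word_ngrams := pyZipN ((PySem.List.pyRange 0 L).map (fun j => PySem.List.slice words (some j) none))
    match labels with
    | none => word_ngrams.foldl (fun a w => a ++ [(w, w)]) acc
    | some l =>
      let label_ngrams := pyZipN ((PySem.List.pyRange 0 L).map (fun j => PySem.List.slice l (some j) none))
      acc ++ word_ngrams.zip label_ngrams) []

-- ===== PRECONDITION & SPEC =====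
-- Pre_ excludes exactly the inputs where Python A raises ValueError (labels given with a
-- length different from words); both programs raise there.
def Pre_iterate_sent_ngrams (words : List String) (labels : Option (List String)) (min_length : Int) (max_length : Int) : Prop :=
  (labels.getD words).length = words.length
instance (words : List String) (labels : Option (List String)) (min_length : Int) (max_length : Int) : Decidable (Pre_iterate_sent_ngrams words labels min_length max_length) := by unfold Pre_iterate_sent_ngrams; infer_instance
def pvWitness_iterate_sent_ngrams : List String × Option (List String) × Int × Int := (["a", "b", "c"], some ["x", "y", "z"], 1, 2)

-- On inputs with min_length ≤ 0 (and a non-empty length range) A also yields the windows of the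
-- non-positive "lengths" min_length-1 ≤ n < 0 — slices words[i:i+n+1], empty or negatively
-- truncated, an artefact of feeding n < 0 into the window loop — while B yields only the
-- n-grams of positive lengths up to max_length, which is the intended set of n-grams.
def D_iterate_sent_ngrams (words : List String) (labels : Option (List String)) (min_length : Int) (max_length : Int) : Prop :=
  min_length ≤ 0 ∧ min_length ≤ max_length
instance (words : List String) (labels : Option (List String)) (min_length : Int) (max_length : Int) : Decidable (D_iterate_sent_ngrams words labels min_length max_length) := by unfold D_iterate_sent_ngrams; infer_instance

def Spec_iterate_sent_ngrams (words : List String) (labels : Option (List String)) (min_length : Int) (max_length : Int) (out : List (List String × List String)) : Prop := ¬ D_iterate_sent_ngrams words labels min_length max_length → out = iterate_sent_ngrams_alt words labels min_length max_length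
instance (words : List String) (labels : Option (List String)) (min_length : Int) (max_length : Int) (out : List (List String × List String)) : Decidable (Spec_iterate_sent_ngrams words labels min_length max_length out) := by unfold Spec_iterate_sent_ngrams; infer_instance

def pvDiffWitness_iterate_sent_ngrams : List String × Option (List String) × Int × Int := (["a"], none, 0, 1)
def pvDiffWitnessOut_iterate_sent_ngrams : (List (List String × List String)) × (List (List String × List String)) :=
  ([([], []), ([], []), (["a"], ["a"])], [(["a"], ["a"])])

-- ===== CLAIM (what is proved, stated in full; the proofs are below) =====
def Claim_unchanged_iterate_sent_ngrams : Prop := ∀ (words : List String) (labels : Option (List String)) (min_length : Int) (max_length : Int), Dom_iterate_sent_ngrams words labels min_length max_length → Pre_iterate_sent_ngrams words labels min_length max_length → Spec_iterate_sent_ngrams words labels min_length max_length (iterate_sent_ngrams words labels min_length max_length)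
def Claim_changed_iterate_sent_ngrams : Prop := Dom_iterate_sent_ngrams (pvDiffWitness_iterate_sent_ngrams.1) (pvDiffWitness_iterate_sent_ngrams.2.1) (pvDiffWitness_iterate_sent_ngrams.2.2.1) (pvDiffWitness_iterate_sent_ngrams.2.2.2) ∧ Pre_iterate_sent_ngrams (pvDiffWitness_iterate_sent_ngrams.1) (pvDiffWitness_iterate_sent_ngrams.2.1) (pvDiffWitness_iterate_sent_ngrams.2.2.1) (pvDiffWitness_iterate_sent_ngrams.2.2.2) ∧ D_iterate_sent_ngrams (pvDiffWitness_iterate_sent_ngrams.1) (pvDiffWitness_iterate_sent_ngrams.2.1) (pvDiffWitness_iterate_sent_ngrams.2.2.1) (pvDiffWitness_iterate_sent_ngrams.2.2.2) ∧ iterate_sent_ngrams (pvDiffWitness_iterate_sent_ngrams.1) (pvDiffWitness_iterate_sent_ngrams.2.1) (pvDiffWitness_iterate_sent_ngrams.2.2.1) (pvDiffWitness_iterate_sent_ngrams.2.2.2) = pvDiffWitnessOut_iterate_sent_ngrams.1 ∧ iterate_sent_ngrams_alt (pvDiffWitness_iterate_sent_ngrams.1) (pvDiffWitness_iterate_sent_ngrams.2.1)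 (pvDiffWitness_iterate_sent_ngrams.2.2.1) (pvDiffWitness_iterate_sent_ngrams.2.2.2) = pvDiffWitnessOut_iterate_sent_ngrams.2 ∧ pvDiffWitnessOut_iterate_sent_ngrams.1 ≠ pvDiffWitnessOut_iterate_sent_ngrams.2

-- ===== LEMMAS AND PROOFS =====

-- one row of the result: all windows of length L with their label windows, in start order
def pvRow (words : List String) (labels : Option (List String)) (L : Nat) : List (List String × List String) :=
  (List.range (words.length + 1 - L)).map (fun i =>
    ((words.drop i).take L, (((labels.getD words).drop i).take L)))

theorem pyZipN_windows {α : Type} (L : Nat) (hL : 1 ≤ L) : ∀ xs : List α,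
    pyZipN ((List.range L).map (fun j => xs.drop j)) =
      (List.range (xs.length + 1 - L)).map (fun i => (xs.drop i).take L) := by
  induction L, hL using Nat.le_induction with
  | base =>
    intro xs
    simp only [List.range_one, List.map_cons, List.map_nil, pyZipN, Nat.add_sub_cancel, List.drop_zero]
    apply List.ext_getElem
    · simp
    · intro i h1 h2
      simp only [List.length_map] at h1 h2
      rw [List.getElem_map, List.getElem_map, List.getElem_range,
        List.drop_eq_getElem_cons (by simpa using h1), List.take_succ_cons, List.take_zero]
  | succ L hL ih =>
    intro xs
    have hr : (List.range (L+1)).map (fun j => xs.drop j)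
        = xs :: (List.range L).map (fun j => (xs.drop 1).drop j) := by
      rw [List.range_succ_eq_map]
      simp [List.map_map, Function.comp_def]
    rw [hr]
    have hne : (List.range L).map (fun j => (xs.drop 1).drop j) ≠ [] := by
      simp [List.range_eq_nil]; omega
    obtain ⟨y, ys, hy⟩ := List.exists_cons_of_ne_nil hne
    rw [hy, show pyZipN (xs :: y :: ys) = (xs.zip (pyZipN (y :: ys))).map (fun p => p.1 :: p.2) from rfl,
      ← hy, ih (xs.drop 1)]
    apply List.ext_getElem
    · simp only [List.length_map, List.length_zip, List.length_range, List.length_drop]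
      omega
    · intro i h1 h2
      simp only [List.length_map, List.length_zip, List.length_range, List.length_drop] at h1 h2
      have hi : i < xs.length := by omega
      rw [List.getElem_map, List.getElem_zip, List.getElem_map, List.getElem_map,
        List.getElem_range, List.getElem_range, List.drop_drop]
      conv_rhs => rw [List.drop_eq_getElem_cons hi, List.take_succ_cons]
      rw [Nat.add_comm 1 i]

theorem row_A_none (words : List String) (n : Int) (hn : 0 ≤ n) :
    ((PySem.List.pyRange 0 ((words.length : Int) - n)).map (fun i =>
      (PySem.List.slice words (some i) (some (i + n + 1)),
        PySem.List.slice words (some i) (some (i + n + 1))))) =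
      pvRow words none (n.toNat + 1) := by
  obtain ⟨m, rfl⟩ : ∃ k : Nat, n = (k : Int) := ⟨n.toNat, (Int.toNat_of_nonneg hn).symm⟩
  rw [PySem.List.pyRange_zero, List.map_map]
  unfold pvRow
  rw [show (((words.length : Int) - (m : Int)).toNat) = words.length + 1 - ((m:Int).toNat + 1) by omega]
  apply List.map_congr_left
  intro k hk
  simp only [Function.comp_apply, Int.toNat_natCast, Option.getD]
  have hcast : (k : Int) + (m : Int) + 1 = (k : Int) + ((m + 1 : Nat) : Int) := by push_cast; ring
  rw [hcast, PySem.List.slice_natCast_add]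

theorem row_A_some (words l : List String) (hlen : l.length = words.length) (n : Int) (hn : 0 ≤ n) :
    ((PySem.List.pyRange 0 ((words.length : Int) - n)).map (fun i =>
      (PySem.List.slice words (some i) (some (i + n + 1)),
        PySem.List.slice l (some i) (some (i + n + 1))))) =
      pvRow words (some l) (n.toNat + 1) := by
  obtain ⟨m, rfl⟩ : ∃ k : Nat, n = (k : Int) := ⟨n.toNat, (Int.toNat_of_nonneg hn).symm⟩
  rw [PySem.List.pyRange_zero, List.map_map]
  unfold pvRow
  rw [show (((words.length : Int) - (m : Int)).toNat) = words.length + 1 - ((m:Int).toNat + 1) by omega]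
  apply List.map_congr_left
  intro k hk
  simp only [Function.comp_apply, Int.toNat_natCast, Option.getD]
  have hcast : (k : Int) + (m : Int) + 1 = (k : Int) + ((m + 1 : Nat) : Int) := by push_cast; ring
  rw [hcast, PySem.List.slice_natCast_add, PySem.List.slice_natCast_add]

theorem zipped_windows (xs : List String) (L : Int) (hL : 1 ≤ L) :
    pyZipN ((PySem.List.pyRange 0 L).map (fun j => PySem.List.slice xs (some j) none)) =
      (List.range (xs.length + 1 - L.toNat)).map (fun i => (xs.drop i).take L.toNat) := by
  rw [PySem.List.pyRange_zero, List.map_map]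
  rw [show ((fun j => PySem.List.slice xs (some j) none) ∘ fun k : Nat => (k : Int))
      = fun j : Nat => xs.drop j from funext fun j => PySem.List.slice_from_natCast xs j]
  exact pyZipN_windows L.toNat (by omega) xs

theorem pvRow_nil (words : List String) (labels : Option (List String)) (K : Nat)
    (h : words.length < K) : pvRow words labels K = [] := by
  unfold pvRow
  rw [Nat.sub_eq_zero_of_le (by omega), List.range_zero, List.map_nil]

theorem tail_cap (words : List String) (labels : Option (List String)) (mn mx : Int) :
    (PySem.List.pyRange mn (mx + 1)).flatMap (fun L => pvRow words labels L.toNat)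
      = (PySem.List.pyRange mn (min mx (words.length : Int) + 1)).flatMap (fun L => pvRow words labels L.toNat) := by
  by_cases h : mx ≤ (words.length : Int)
  · rw [min_eq_left h]
  · rw [min_eq_right (by omega)]
    by_cases h2 : mn ≤ (words.length : Int) + 1
    · rw [PySem.List.pyRange_one_append mn ((words.length : Int) + 1) (mx + 1) h2 (by omega),
        List.flatMap_append]
      have hnil : (PySem.List.pyRange ((words.length : Int) + 1) (mx + 1)).flatMap
          (fun L => pvRow words labels L.toNat) = [] := by
        rw [List.flatMap_eq_nil_iff]
        intro L hL
        rw [PySem.List.mem_pyRange_one] at hL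
        exact pvRow_nil words labels L.toNat (by omega)
      rw [hnil, List.append_nil]
    · rw [show PySem.List.pyRange mn ((words.length : Int) + 1) = []
          from PySem.List.pyRange_one_eq_nil (by omega), List.flatMap_nil,
        List.flatMap_eq_nil_iff]
      intro L hL
      rw [PySem.List.mem_pyRange_one] at hL
      exact pvRow_nil words labels L.toNat (by omega)

theorem tail_eq {α : Type} (f : Nat → List α) (mn mx : Int) (h1 : 1 ≤ mn) :
    (PySem.List.pyRange (mn - 1) mx).flatMap (fun n => f (n.toNat + 1))
      = (PySem.List.pyRange mn (mx + 1)).flatMap (fun L => f L.toNat) := by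
  rw [PySem.List.pyRange_one (mn - 1) mx, PySem.List.pyRange_one mn (mx + 1),
    List.flatMap_map, List.flatMap_map,
    show (mx - (mn - 1)).toNat = (mx + 1 - mn).toNat by omega,
    show (fun k : Nat => f ((mn - 1 + (k : Int)).toNat + 1))
      = (fun k : Nat => f ((mn + (k : Int)).toNat)) from funext fun k => by congr 1; omega]

-- ===== VERDICT (by name: the statement is the Claim_ definition above) =====
theorem iterate_sent_ngrams_spec : Claim_unchanged_iterate_sent_ngrams := by
  intro words labels min_length max_length hdom hpre hnD
  show iterate_sent_ngrams words labels min_length max_length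
      = iterate_sent_ngrams_alt words labels min_length max_length
  rcases labels with _ | l
  all_goals unfold iterate_sent_ngrams iterate_sent_ngrams_alt
  · by_cases hle : min_length ≤ max_length
    · have h0 : ¬ (min_length ≤ 0) := fun h => hnD ⟨h, hle⟩
      have stepA : ∀ (acc : List (List String × List String)) (n : Int),
          n ∈ PySem.List.pyRange (min_length - 1) max_length →
          (PySem.List.pyRange 0 ((words.length : Int) - n)).foldl (fun acc2 i =>
            acc2 ++ [(PySem.List.slice words (some i) (some (i + n + 1)),
              PySem.List.slice words (some i) (some (i + n + 1)))]) acc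
            = acc ++ pvRow words none (n.toNat + 1) := by
        intro acc n hn
        have hn0 : 0 ≤ n := by rw [PySem.List.mem_pyRange_one] at hn; omega
        rw [PySem.List.foldl_append_singleton_eq_map]
        exact congrArg (acc ++ ·) (row_A_none words n hn0)
      have stepB : ∀ (acc : List (List String × List String)) (L : Int),
          L ∈ PySem.List.pyRange min_length (min max_length (words.length : Int) + 1) →
          (pyZipN ((PySem.List.pyRange 0 L).map (fun j => PySem.List.slice words (some j) none))).foldl
            (fun a w => a ++ [(w, w)]) acc
            = acc ++ pvRow words none L.toNat := by
        intro acc L hL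
        have hL1 : 1 ≤ L := by rw [PySem.List.mem_pyRange_one] at hL; omega
        rw [zipped_windows words L hL1, PySem.List.foldl_append_singleton_eq_map]
        unfold pvRow
        simp [List.map_map, Function.comp_def]
      refine .trans (PySem.List.foldl_congr_mem _ _ _ _ stepA)
        (.trans ?_ (PySem.List.foldl_congr_mem _ _ _ _ stepB).symm)
      rw [PySem.List.foldl_append_eq_flatMap, PySem.List.foldl_append_eq_flatMap,
        List.nil_append, List.nil_append]
      exact (tail_eq (pvRow words none) min_length max_length (by omega)).trans
        (tail_cap words none min_length max_length)
    · rw [PySem.List.pyRange_one_eq_nil (by omega), PySem.List.pyRange_one_eq_nil (by omega)]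
      rfl
  · by_cases hle : min_length ≤ max_length
    · have h0 : ¬ (min_length ≤ 0) := fun h => hnD ⟨h, hle⟩
      have hpre' : l.length = words.length := hpre
      have stepA : ∀ (acc : List (List String × List String)) (n : Int),
          n ∈ PySem.List.pyRange (min_length - 1) max_length →
          (PySem.List.pyRange 0 ((words.length : Int) - n)).foldl (fun acc2 i =>
            acc2 ++ [(PySem.List.slice words (some i) (some (i + n + 1)),
              PySem.List.slice l (some i) (some (i + n + 1)))]) acc
            = acc ++ pvRow words (some l) (n.toNat + 1) := by
        intro acc n hn
        have hn0 : 0 ≤ n := by rw [PySem.List.mem_pyRange_one] at hn; omega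
        rw [PySem.List.foldl_append_singleton_eq_map]
        exact congrArg (acc ++ ·) (row_A_some words l hpre' n hn0)
      have stepB : ∀ (acc : List (List String × List String)) (L : Int),
          L ∈ PySem.List.pyRange min_length (min max_length (words.length : Int) + 1) →
          acc ++ (pyZipN ((PySem.List.pyRange 0 L).map (fun j => PySem.List.slice words (some j) none))).zip
            (pyZipN ((PySem.List.pyRange 0 L).map (fun j => PySem.List.slice l (some j) none)))
            = acc ++ pvRow words (some l) L.toNat := by
        intro acc L hL
        have hL1 : 1 ≤ L := by rw [PySem.List.mem_pyRange_one] at hL; omega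
        rw [zipped_windows words L hL1, zipped_windows l L hL1, hpre', List.zip_map']
        unfold pvRow
        simp only [Option.getD]
      refine .trans (PySem.List.foldl_congr_mem _ _ _ _ stepA)
        (.trans ?_ (PySem.List.foldl_congr_mem _ _ _ _ stepB).symm)
      rw [PySem.List.foldl_append_eq_flatMap, PySem.List.foldl_append_eq_flatMap,
        List.nil_append, List.nil_append]
      exact (tail_eq (pvRow words (some l)) min_length max_length (by omega)).trans
        (tail_cap words (some l) min_length max_length)
    · rw [PySem.List.pyRange_one_eq_nil (by omega), PySem.List.pyRange_one_eq_nil (by omega)]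
      rfl

theorem iterate_sent_ngrams_changed : Claim_changed_iterate_sent_ngrams := by
  unfold Claim_changed_iterate_sent_ngrams; decide
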